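-- pv_equiv track=rewrite | github.com/Bhavyasri3/Gfg | Difficulty: Medium/Rotate and delete/rotate-and-delete.py | rotateDelete
-- ===== SOURCE A (Python) =====
-- def rotateDelete(arr):
--     # code here
--     n=len(arr)
--     m=n//2
--     for i in range(1,m+1):
--         arr=[arr[-1]]+arr[:-1]
--         d=len(arr)-i
--         arr.pop(d)
--     return arr[0]
-- ===== SOURCE B (Python) =====
-- def rotateDelete(arr):
--     # Pure index arithmetic: track the rank of the current front and of each
--     # deleted element among the surviving elements (no list is ever rebuilt),
--     # then map the final rank back to an index in the original array.
--     n = len(arr)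
--     s = 0
--     rs = []
--     for i in range(1, n // 2 + 1):
--         L = n - i + 1
--         s = (s - 1) % L
--         r = (s - i) % L
--         rs.append(r)
--         if r < s:
--             s -= 1
--     idx = s
--     for r in reversed(rs):
--         if idx >= r:
--             idx += 1
--     return arr[idx]
-- ===== Notes on version B (the rewrite author's own statement) =====
-- stated objective: faster
-- what changed: A physically rebuilds the list every iteration (rotate via slicing, then pop from the middle); B never touches the list: it tracks the front's rank and each deleted element's rank with modular arithmetic in one forward pass, then maps the final rank back to an original index with one backward pass and indexes the input once.
-- outside the precondition, e.g. on rotateDelete([]): A raises IndexError, B raises IndexError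
import Mathlib
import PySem

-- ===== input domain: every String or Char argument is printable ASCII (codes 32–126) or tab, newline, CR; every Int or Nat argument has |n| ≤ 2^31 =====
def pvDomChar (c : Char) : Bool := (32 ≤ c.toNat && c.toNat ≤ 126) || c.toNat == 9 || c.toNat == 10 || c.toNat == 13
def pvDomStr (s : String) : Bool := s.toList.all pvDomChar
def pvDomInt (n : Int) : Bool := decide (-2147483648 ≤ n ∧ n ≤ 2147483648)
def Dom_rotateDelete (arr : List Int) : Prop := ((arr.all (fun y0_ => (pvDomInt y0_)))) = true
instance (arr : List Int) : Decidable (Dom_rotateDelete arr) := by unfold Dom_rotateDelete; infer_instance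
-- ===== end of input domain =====

-- B replaces A's repeated list rotation + middle pop by pure index arithmetic over
-- surviving ranks plus one backward pass (measured faster at large sizes); equivalence
-- is proved for every non-empty list (A raises IndexError on []).

-- ===== PORT A =====
-- one loop iteration of A: arr = [arr[-1]] + arr[:-1]; d = len(arr) - i; arr.pop(d)
def rotStepA (i : Int) (arr : List Int) : List Int :=
  let rotated := ((PySem.List.pyGet? arr (-1)).getD 0) :: PySem.List.slice arr none (some (-1))
  let d : Int := (rotated.length : Int) - i
  match PySem.List.pop? rotated d with
  | some p => p.2
  | none => []   -- unreachable: d is a valid index on every list this loop ever sees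

def rotateDelete (arr : List Int) : Int :=
  let n : Int := arr.length
  let m : Int := PySem.Int.floordiv n 2
  let final := (PySem.List.pyRange 1 (m + 1) 1).foldl (fun a i => rotStepA i a) arr
  -- Python returns arr[0]; on [] it raises IndexError (excluded by Pre_)
  (PySem.List.pyGet? final 0).getD 0

-- ===== PORT B =====
def rotateDelete_alt (arr : List Int) : Int :=
  let n : Int := arr.length
  let st := (PySem.List.pyRange 1 (PySem.Int.floordiv n 2 + 1) 1).foldl
    (fun (st : Int × List Int) j =>
      let L := n - j + 1
      let s1 := PySem.Int.mod (st.1 - 1) L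
      let r := PySem.Int.mod (s1 - j) L
      let s2 := if r < s1 then s1 - 1 else s1
      (s2, st.2 ++ [r])) ((0 : Int), ([] : List Int))
  let idx := st.2.reverse.foldl (fun idx r => if idx ≥ r then idx + 1 else idx) st.1
  -- Python returns arr[idx]; on [] it raises IndexError (excluded by Pre_)
  (PySem.List.pyGet? arr idx).getD 0

-- ===== PRECONDITION & SPEC =====
-- Pre_ excludes only the empty list, on which A raises IndexError at arr[0].
def Pre_rotateDelete (arr : List Int) : Prop := arr ≠ []
instance (arr : List Int) : Decidable (Pre_rotateDelete arr) := by unfold Pre_rotateDelete; infer_instance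
def pvWitness_rotateDelete : List Int := [3, 1, 4, 1, 5]

def Spec_rotateDelete (arr : List Int) (out : Int) : Prop := out = rotateDelete_alt arr
instance (arr : List Int) (out : Int) : Decidable (Spec_rotateDelete arr out) := by unfold Spec_rotateDelete; infer_instance

-- ===== CLAIM (what is proved, stated in full; the proofs are below) =====
def Claim_equal_rotateDelete : Prop := ∀ (arr : List Int), Dom_rotateDelete arr → Pre_rotateDelete arr → Spec_rotateDelete arr (rotateDelete arr)

-- ===== LEMMAS AND PROOFS =====

-- Nat-level model of B's forward loop: from step i with k steps left and front rank s,
-- the final front rank and the list of removed ranks (one per step, in order).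
def fwdN (n : Nat) : Nat → Nat → Nat → Nat × List Nat
  | _, s, 0 => (s, [])
  | i, s, k+1 =>
      let L := n - i + 1
      let s1 := (s + L - 1) % L
      let r := (s1 + (L - i)) % L
      let s2 := if r < s1 then s1 - 1 else s1
      let p := fwdN n (i+1) s2 k
      (p.1, r :: p.2)

-- Nat-level model of B's backward pass.
def backN (rs : List Nat) (t : Nat) : Nat :=
  rs.foldr (fun r t => if r ≤ t then t + 1 else t) t

lemma natMod_ne (s d L : Nat) (hs : s < L) (hd0 : 0 < d) (hdL : d < L) :
    (s + d) % L ≠ s := by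
  rcases Nat.lt_or_ge (s + d) L with h | h
  · rw [Nat.mod_eq_of_lt h]; omega
  · have : (s + d) % L = s + d - L := by
      rw [Nat.mod_eq_sub_mod h, Nat.mod_eq_of_lt (by omega)]
    omega

-- rotating: [l[-1]] + l[:-1] on l = drop s xs ++ take s xs shifts the front rank to (s+L-1) % L
lemma rot_eq (xs : List Int) (s : Nat) (hs : s < xs.length) :
    ((PySem.List.pyGet? (xs.drop s ++ xs.take s) (-1)).getD 0)
        :: PySem.List.slice (xs.drop s ++ xs.take s) none (some (-1))
      = xs.drop ((s + xs.length - 1) % xs.length) ++ xs.take ((s + xs.length - 1) % xs.length) := by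
  rcases Nat.eq_zero_or_pos s with h0 | hpos
  · subst h0
    have hmod : (0 + xs.length - 1) % xs.length = xs.length - 1 := by
      rw [Nat.zero_add, Nat.mod_eq_of_lt (by omega)]
    rw [hmod, List.drop_zero, List.take_zero, List.append_nil,
        PySem.List.pyGet?_neg_one, PySem.List.slice_to_neg_one,
        List.getLast?_eq_getElem?, List.getElem?_eq_getElem (by omega),
        List.drop_eq_getElem_cons (by omega : xs.length - 1 < xs.length),
        (by omega : xs.length - 1 + 1 = xs.length), List.drop_length,
        List.dropLast_eq_take]
    rfl
  · have hmod : (s + xs.length - 1) % xs.length = s - 1 := by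
      have h1 : s + xs.length - 1 = (s - 1) + xs.length := by omega
      rw [h1, Nat.add_mod_right, Nat.mod_eq_of_lt (by omega)]
    have htake : xs.take s = xs.take (s-1) ++ [xs[s-1]] := by
      have h2 := List.take_add_one (l := xs) (i := s - 1)
      rw [(by omega : s - 1 + 1 = s)] at h2
      rw [h2, List.getElem?_eq_getElem (by omega)]
      rfl
    rw [hmod, htake, ← List.append_assoc,
        PySem.List.pyGet?_neg_one_append_singleton, PySem.List.slice_to_neg_one,
        List.dropLast_concat,
        List.drop_eq_getElem_cons (by omega : s - 1 < xs.length),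
        (by omega : s - 1 + 1 = s)]
    rfl

-- popping index d (1 ≤ d < L) from drop s xs ++ take s xs erases rank (s+d) % L of xs
lemma pop_eq (xs : List Int) (s d : Nat) (hs : s < xs.length) (hd0 : 0 < d) (hd : d < xs.length) :
    (xs.drop s ++ xs.take s).eraseIdx d
      = (xs.eraseIdx ((s + d) % xs.length)).drop (if (s + d) % xs.length < s then s - 1 else s)
        ++ (xs.eraseIdx ((s + d) % xs.length)).take (if (s + d) % xs.length < s then s - 1 else s) := by
  have hdl : (xs.drop s).length = xs.length - s := by simp
  have htl : ∀ n, n ≤ xs.length → (xs.take n).length = n := by intro n h; simp; omega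
  rcases Nat.lt_or_ge (s + d) xs.length with h | h
  · have hr : (s + d) % xs.length = s + d := Nat.mod_eq_of_lt h
    have e1 : (xs.drop s ++ xs.take s).eraseIdx d = (xs.drop s).eraseIdx d ++ xs.take s :=
      List.eraseIdx_append_of_lt_length (by omega) _
    have e2 : (xs.drop s).eraseIdx d = (xs.take (s+d)).drop s ++ xs.drop (s+d+1) := by
      rw [List.eraseIdx_eq_take_drop_succ, List.take_drop, List.drop_drop,
          (by omega : s + (d+1) = s + d + 1)]
    have e3 : (xs.eraseIdx (s+d)).drop s = (xs.take (s+d)).drop s ++ xs.drop (s+d+1) := by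
      rw [List.eraseIdx_eq_take_drop_succ, List.drop_append, htl (s+d) (by omega),
          (by omega : s - (s+d) = 0), List.drop_zero]
    have e4 : (xs.eraseIdx (s+d)).take s = xs.take s := by
      rw [List.eraseIdx_eq_take_drop_succ, List.take_append, htl (s+d) (by omega),
          (by omega : s - (s+d) = 0), List.take_zero, List.append_nil,
          List.take_take, (by omega : min s (s+d) = s)]
    rw [hr, if_neg (by omega), e1, e2, e3, e4, List.append_assoc]
  · have hr : (s + d) % xs.length = s + d - xs.length := by
      rw [Nat.mod_eq_sub_mod h, Nat.mod_eq_of_lt (by omega)]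
    set r := s + d - xs.length with hrdef
    have hrs : r < s := by omega
    have e1 : (xs.drop s ++ xs.take s).eraseIdx d = xs.drop s ++ (xs.take s).eraseIdx r := by
      rw [List.eraseIdx_append_of_length_le (by omega : (xs.drop s).length ≤ d), hdl,
          (by omega : d - (xs.length - s) = r)]
    have e2 : (xs.take s).eraseIdx r = xs.take r ++ (xs.drop (r+1)).take (s-1-r) := by
      rw [List.eraseIdx_eq_take_drop_succ, List.take_take, (by omega : min r s = r),
          List.take_drop, (by omega : r + 1 + (s-1-r) = s)]
    have e3 : (xs.eraseIdx r).drop (s-1) = xs.drop s := by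
      rw [List.eraseIdx_eq_take_drop_succ, List.drop_append, htl r (by omega),
          List.drop_eq_nil_of_le (by rw [htl r (by omega)]; omega : (xs.take r).length ≤ s - 1),
          List.drop_drop, (by omega : r + 1 + (s - 1 - r) = s), List.nil_append]
    have e4 : (xs.eraseIdx r).take (s-1) = xs.take r ++ (xs.drop (r+1)).take (s-1-r) := by
      rw [List.eraseIdx_eq_take_drop_succ, List.take_append, htl r (by omega),
          List.take_take, (by omega : min (s-1) r = r)]
    rw [hr, if_pos hrs, e1, e2, e3, e4]

-- the main invariant: A's remaining loop on the rotated view of xs lands, at index 0,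
-- on the element of xs selected by B's rank bookkeeping
lemma key (n : Nat) (k : Nat) : ∀ (i s : Nat) (xs : List Int),
    xs.length + i = n + 1 → 1 ≤ i → i + k ≤ n / 2 + 1 → s < xs.length →
    ((PySem.List.pyRange (i : Int) ((i : Int) + (k : Int)) 1).foldl
        (fun a j => rotStepA j a) (xs.drop s ++ xs.take s))[0]?
      = xs[backN (fwdN n i s k).2 (fwdN n i s k).1]? := by
  induction k with
  | zero =>
      intro i s xs hlen hi hk hs
      rw [(by ring : (i : Int) + ((0:Nat) : Int) = (i : Int)),
          PySem.List.pyRange_one_eq_nil le_rfl, List.foldl_nil]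
      show (xs.drop s ++ xs.take s)[0]? = xs[s]?
      rw [List.getElem?_append_left (by simp; omega), List.getElem?_drop, Nat.add_zero]
  | succ k ih =>
      intro i s xs hlen hi hk hs
      have hL : xs.length = n - i + 1 := by omega
      set L := xs.length with hLdef
      have hiL : i < L := by omega
      have hL1 : 0 < L := by omega
      -- unfold one element of the range
      rw [(by push_cast; ring : (i : Int) + ((k+1 : Nat) : Int) = (i : Int) + ((k:Nat) : Int) + 1)]
      rw [PySem.List.pyRange_one_cons (by omega), List.foldl_cons]
      -- the rotation followed by the pop
      have hrot : rotStepA (i : Int) (xs.drop s ++ xs.take s)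
          = (xs.eraseIdx (((s + L - 1) % L + (L - i)) % L)).drop
              (if ((s + L - 1) % L + (L - i)) % L < (s + L - 1) % L then (s + L - 1) % L - 1 else (s + L - 1) % L)
            ++ (xs.eraseIdx (((s + L - 1) % L + (L - i)) % L)).take
              (if ((s + L - 1) % L + (L - i)) % L < (s + L - 1) % L then (s + L - 1) % L - 1 else (s + L - 1) % L) := by
        unfold rotStepA
        rw [rot_eq xs s hs]
        simp only []
        set s1 := (s + L - 1) % L with hs1
        have hs1L : s1 < L := Nat.mod_lt _ hL1
        have hlenrot : ((xs.drop s1 ++ xs.take s1)).length = L := by simp; omega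
        have hd : ((xs.drop s1 ++ xs.take s1).length : Int) - (i : Int) = ((L - i : Nat) : Int) := by
          rw [hlenrot]; omega
        rw [hd, PySem.List.pop?_natCast (xs.drop s1 ++ xs.take s1) (L - i) (by rw [hlenrot]; omega)]
        exact pop_eq xs s1 (L - i) hs1L (by omega) (by omega)
      rw [hrot]
      -- apply the induction hypothesis to the erased list
      set s1 := (s + L - 1) % L with hs1
      set r := (s1 + (L - i)) % L with hrr
      set s2 := if r < s1 then s1 - 1 else s1 with hs2
      have hs1L : s1 < L := Nat.mod_lt _ hL1
      have hrL : r < L := Nat.mod_lt _ hL1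
      have hrne : r ≠ s1 := natMod_ne s1 (L - i) L hs1L (by omega) (by omega)
      have hlen' : (xs.eraseIdx r).length = L - 1 := by
        rw [List.length_eraseIdx_of_lt (by omega)]
      have hs2lt : s2 < (xs.eraseIdx r).length := by
        rw [hlen']; rw [hs2]; split_ifs with hc <;> omega
      have := ih (i+1) s2 (xs.eraseIdx r) (by omega) (by omega) (by omega) hs2lt
      rw [(by push_cast; ring : ((i+1 : Nat) : Int) = (i : Int) + 1),
          (by ring : ((i : Int) + 1 + ((k:Nat) : Int)) = (i : Int) + ((k:Nat) : Int) + 1)] at this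
      rw [this]
      -- fold one fwdN step and one backN step
      show (xs.eraseIdx r)[backN (fwdN n (i+1) s2 k).2 (fwdN n (i+1) s2 k).1]?
        = xs[backN (fwdN n i s (k+1)).2 (fwdN n i s (k+1)).1]?
      have hfw : fwdN n i s (k+1) = ((fwdN n (i+1) s2 k).1, r :: (fwdN n (i+1) s2 k).2) := by
        simp only [fwdN]
        rw [← hL]
      rw [hfw]
      set t := backN (fwdN n (i+1) s2 k).2 (fwdN n (i+1) s2 k).1 with ht
      have hback : backN (r :: (fwdN n (i+1) s2 k).2) (fwdN n (i+1) s2 k).1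
          = if r ≤ t then t + 1 else t := by
        unfold backN
        rw [List.foldr_cons]
        rfl
      rw [hback, List.getElem?_eraseIdx]
      split_ifs with h1 h2 h2 <;> try omega
      · rfl
      · rfl

-- B's Int loop computes fwdN
lemma fwdB (nI : Int) (n : Nat) (hn : nI = (n : Int)) (k : Nat) : ∀ (i s : Nat) (acc : List Int),
    1 ≤ i → i + k ≤ n / 2 + 1 → s < n + 1 - i →
    ((PySem.List.pyRange (i : Int) ((i : Int) + (k : Int)) 1).foldl
        (fun (st : Int × List Int) j =>
          let L := nI - j + 1
          let s1 := PySem.Int.mod (st.1 - 1) L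
          let r := PySem.Int.mod (s1 - j) L
          let s2 := if r < s1 then s1 - 1 else s1
          (s2, st.2 ++ [r])) ((s : Int), acc))
      = (((fwdN n i s k).1 : Int), acc ++ (fwdN n i s k).2.map (fun (r : Nat) => (r : Int))) := by
  induction k with
  | zero =>
      intro i s acc hi hk hs
      rw [(by ring : (i : Int) + ((0:Nat) : Int) = (i : Int)),
          PySem.List.pyRange_one_eq_nil le_rfl, List.foldl_nil]
      simp [fwdN]
  | succ k ih =>
      intro i s acc hi hk hs
      have hin : i ≤ n / 2 := by omega
      have h2i : i ≤ n - i := by omega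
      set LN := n - i + 1 with hLN
      have hiLN : i < LN := by omega
      rw [(by push_cast; ring : (i : Int) + ((k+1 : Nat) : Int) = (i : Int) + ((k:Nat) : Int) + 1)]
      rw [PySem.List.pyRange_one_cons (by omega), List.foldl_cons]
      simp only []
      -- identify the Int computations with their Nat counterparts
      have hLI : nI - (i : Int) + 1 = ((LN : Nat) : Int) := by rw [hn]; omega
      have hLpos : (0 : Int) < ((LN : Nat) : Int) := by omega
      set s1N := (s + LN - 1) % LN with hs1N
      have hs1 : PySem.Int.mod ((s : Int) - 1) (nI - (i : Int) + 1) = ((s1N : Nat) : Int) := by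
        rw [hLI, PySem.Int.mod_eq_emod_of_pos hLpos,
            (by omega : (s : Int) - 1 = ((s + LN - 1 : Nat) : Int) - ((LN : Nat) : Int)),
            Int.sub_emod_right, ← Int.natCast_mod]
      rw [hs1]
      have hs1lt : s1N < LN := Nat.mod_lt _ (by omega)
      set rN := (s1N + (LN - i)) % LN with hrN
      have hr : PySem.Int.mod (((s1N : Nat) : Int) - (i : Int)) (nI - (i : Int) + 1) = ((rN : Nat) : Int) := by
        rw [hLI, PySem.Int.mod_eq_emod_of_pos hLpos,
            (by omega : ((s1N : Nat) : Int) - (i : Int) = ((s1N + (LN - i) : Nat) : Int) - ((LN : Nat) : Int)),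
            Int.sub_emod_right, ← Int.natCast_mod]
      rw [hr]
      have hrlt : rN < LN := Nat.mod_lt _ (by omega)
      have hrne : rN ≠ s1N := natMod_ne s1N (LN - i) LN hs1lt (by omega) (by omega)
      set s2N := if rN < s1N then s1N - 1 else s1N with hs2N
      have hs2 : (if ((rN : Nat) : Int) < ((s1N : Nat) : Int) then ((s1N : Nat) : Int) - 1 else ((s1N : Nat) : Int)) = ((s2N : Nat) : Int) := by
        by_cases hc : rN < s1N
        · rw [if_pos (by exact_mod_cast hc), hs2N, if_pos hc]; omega
        · rw [if_neg (by exact_mod_cast hc), hs2N, if_neg hc]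
      rw [hs2]
      have hs2lt : s2N < n + 1 - (i + 1) := by
        have : LN = n + 1 - i := by omega
        rw [hs2N]; split_ifs with hc <;> omega
      have := ih (i+1) s2N (acc ++ [((rN : Nat) : Int)]) (by omega) (by omega) hs2lt
      rw [(by push_cast; ring : ((i+1 : Nat) : Int) = (i : Int) + 1),
          (by ring : ((i : Int) + 1 + ((k:Nat) : Int)) = (i : Int) + ((k:Nat) : Int) + 1)] at this
      rw [this]
      have hfw : fwdN n i s (k+1) = ((fwdN n (i+1) s2N k).1, rN :: (fwdN n (i+1) s2N k).2) := by
        simp only [fwdN]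
        rfl
      rw [hfw, List.map_cons, ← List.append_cons]

-- B's backward pass computes backN
lemma backB (rs : List Nat) (t : Nat) :
    ((rs.map (fun (r : Nat) => (r : Int))).reverse.foldl
        (fun idx r => if idx ≥ r then idx + 1 else idx) (t : Int))
      = (backN rs t : Int) := by
  rw [List.foldl_reverse]
  induction rs generalizing t with
  | nil => rfl
  | cons r rs ih =>
      rw [List.map_cons, List.foldr_cons, ih]
      unfold backN
      rw [List.foldr_cons]
      show (if (backN rs t : Int) ≥ (r : Int) then (backN rs t : Int) + 1 else (backN rs t : Int))
        = (((if r ≤ backN rs t then backN rs t + 1 else backN rs t) : Nat) : Int)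
      by_cases h : r ≤ backN rs t
      · rw [if_pos h, if_pos (by exact_mod_cast h)]; push_cast; ring
      · rw [if_neg h, if_neg (by exact_mod_cast h)]

-- ===== VERDICT (by name: the statement is the Claim_ definition above) =====
theorem rotateDelete_spec : Claim_equal_rotateDelete := by
  intro arr _ hpre
  unfold Spec_rotateDelete rotateDelete rotateDelete_alt
  simp only []
  have hlen : 0 < arr.length := List.length_pos_iff.mpr hpre
  set n := arr.length with hn
  have hm : PySem.Int.floordiv ((n : Nat) : Int) 2 = ((n / 2 : Nat) : Int) := by
    exact_mod_cast PySem.Int.floordiv_natCast n 2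
  rw [hm]
  -- A's loop
  have hA := key n (n/2) 1 0 arr (by omega) le_rfl (by omega) (by omega)
  rw [List.drop_zero, List.take_zero, List.append_nil,
      (by norm_num : ((1:Nat) : Int) = (1 : Int)),
      (by ring : (1 : Int) + ((n/2 : Nat) : Int) = ((n/2 : Nat) : Int) + 1)] at hA
  -- B's loop
  have hB := fwdB ((n : Nat) : Int) n rfl (n/2) 1 0 [] le_rfl (by omega) (by omega)
  rw [List.nil_append, Nat.cast_zero,
      (by norm_num : ((1:Nat) : Int) = (1 : Int)),
      (by ring : (1 : Int) + ((n/2 : Nat) : Int) = ((n/2 : Nat) : Int) + 1)] at hB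
  rw [hB]
  simp only []
  rw [backB, PySem.List.pyGet?_natCast, PySem.List.pyGet?_zero, hA]
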